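-- pv_equiv track=rewrite | github.com/M-JEFFRYES/c3d_gait | src/c3d_extract_data.py | analog_channel_groups
-- ===== SOURCE A (Python) =====
-- def analog_channel_groups(labels):
--     """
--     Groups channel labels for the different analog measurements.
--         Arguments:
--             labels(List): List  of the analog channel labels
--         Returns:
--             forceplate(List): List  of the forceplate channel labels
--             emg(List): List  of the emg channel labels
--             myometer(List): List  of the myometer channel labels
--     """
--
--     forceplate, emg, other = [], [], []
--
--     for label in labels:
--         if "myometer" in label:
--             other.append(label)
--         elif "MYO" in label:
--             other.append(label)
--         elif "FSR" in label:
--             other.append(label)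
--         elif "Force" in label:
--             forceplate.append(label)
--         elif "FX" in label:
--             forceplate.append(label)
--         elif "FY" in label:
--             forceplate.append(label)
--         elif "FZ" in label:
--             forceplate.append(label)
--         elif "Moment" in label:
--             forceplate.append(label)
--         elif "MX" in label:
--             forceplate.append(label)
--         elif "MY" in label:
--             forceplate.append(label)
--         elif "MZ" in label:
--             forceplate.append(label)
--         else:
--             emg.append(label)
--     return forceplate, emg, other
-- ===== SOURCE B (Python) =====
-- _OTHER_KW = ["myometer", "MYO", "FSR"]
-- _FORCE_KW = ["Force", "FX", "FY", "FZ", "Moment", "MX", "MY", "MZ"]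
--
--
-- def _classify(label):
--     # 2 = other (checked first, preserving priority), 0 = forceplate, 1 = emg
--     if any(k in label for k in _OTHER_KW):
--         return 2
--     if any(k in label for k in _FORCE_KW):
--         return 0
--     return 1
--
--
-- def analog_channel_groups(labels):
--     return ([l for l in labels if _classify(l) == 0],
--             [l for l in labels if _classify(l) == 1],
--             [l for l in labels if _classify(l) == 2])
-- ===== Notes on version B (the rewrite author's own statement) =====
-- stated objective: idiomatic
-- what changed: Replaces the single loop with an 11-branch elif ladder by a keyword-table classifier function plus three filter passes over the labels.
import Mathlib
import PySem

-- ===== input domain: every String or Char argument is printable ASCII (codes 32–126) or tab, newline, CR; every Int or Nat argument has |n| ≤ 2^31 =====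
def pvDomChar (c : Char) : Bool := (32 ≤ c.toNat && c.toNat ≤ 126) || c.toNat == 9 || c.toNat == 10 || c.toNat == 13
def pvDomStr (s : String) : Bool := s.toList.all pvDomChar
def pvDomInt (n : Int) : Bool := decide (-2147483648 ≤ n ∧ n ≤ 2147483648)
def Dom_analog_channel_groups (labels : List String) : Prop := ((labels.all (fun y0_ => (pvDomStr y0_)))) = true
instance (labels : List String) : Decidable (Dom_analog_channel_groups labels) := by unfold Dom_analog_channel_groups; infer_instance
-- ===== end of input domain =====

-- B replaces A's 11-branch elif ladder loop by a keyword-table classifier plus three filter passes (idiomatic; same return value).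

-- ===== PORT A =====
-- loop body of A's single for-loop, branch for branch
def aStep (acc : List String × List String × List String) (label : String) :
    List String × List String × List String :=
  let (forceplate, emg, other) := acc
  if PySem.Str.isIn "myometer" label then (forceplate, emg, other ++ [label])
  else if PySem.Str.isIn "MYO" label then (forceplate, emg, other ++ [label])
  else if PySem.Str.isIn "FSR" label then (forceplate, emg, other ++ [label])
  else if PySem.Str.isIn "Force" label then (forceplate ++ [label], emg, other)
  else if PySem.Str.isIn "FX" label then (forceplate ++ [label], emg, other)
  else if PySem.Str.isIn "FY" label then (forceplate ++ [label], emg, other)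
  else if PySem.Str.isIn "FZ" label then (forceplate ++ [label], emg, other)
  else if PySem.Str.isIn "Moment" label then (forceplate ++ [label], emg, other)
  else if PySem.Str.isIn "MX" label then (forceplate ++ [label], emg, other)
  else if PySem.Str.isIn "MY" label then (forceplate ++ [label], emg, other)
  else if PySem.Str.isIn "MZ" label then (forceplate ++ [label], emg, other)
  else (forceplate, emg ++ [label], other)

def analog_channel_groups (labels : List String) : List String × List String × List String :=
  labels.foldl aStep ([], [], [])

-- ===== PORT B =====
-- 2 = other (checked first, preserving priority), 0 = forceplate, 1 = emg
def classify_label (label : String) : Nat :=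
  if (["myometer", "MYO", "FSR"].any (fun k => PySem.Str.isIn k label)) then 2
  else if (["Force", "FX", "FY", "FZ", "Moment", "MX", "MY", "MZ"].any
            (fun k => PySem.Str.isIn k label)) then 0
  else 1

def analog_channel_groups_alt (labels : List String) : List String × List String × List String :=
  (labels.filter (fun l => classify_label l == 0),
   labels.filter (fun l => classify_label l == 1),
   labels.filter (fun l => classify_label l == 2))

-- ===== PRECONDITION & SPEC =====
def Spec_analog_channel_groups (labels : List String) (out : List String × List String × List String) : Prop := out = analog_channel_groups_alt labels
instance (labels : List String) (out : List String × List String × List String) : Decidable (Spec_analog_channel_groups labels out) := by unfold Spec_analog_channel_groups; infer_instance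

-- ===== CLAIM (what is proved, stated in full; the proofs are below) =====
def Claim_equal_analog_channel_groups : Prop := ∀ (labels : List String), Dom_analog_channel_groups labels → Spec_analog_channel_groups labels (analog_channel_groups labels)

-- ===== LEMMAS AND PROOFS =====

theorem aStep_eq_classify (f e o : List String) (l : String) :
    aStep (f, e, o) l =
      if classify_label l == 0 then (f ++ [l], e, o)
      else if classify_label l == 1 then (f, e ++ [l], o)
      else (f, e, o ++ [l]) := by
  unfold aStep classify_label
  by_cases h1 : PySem.Str.isIn "myometer" l = true
  · simp_all [PySem.Str.isIn]
  ·
    by_cases h2 : PySem.Str.isIn "MYO" l = true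
    · simp_all [PySem.Str.isIn]
    ·
      by_cases h3 : PySem.Str.isIn "FSR" l = true
      · simp_all [PySem.Str.isIn]
      ·
        by_cases h4 : PySem.Str.isIn "Force" l = true
        · simp_all [PySem.Str.isIn]
        ·
          by_cases h5 : PySem.Str.isIn "FX" l = true
          · simp_all [PySem.Str.isIn]
          ·
            by_cases h6 : PySem.Str.isIn "FY" l = true
            · simp_all [PySem.Str.isIn]
            ·
              by_cases h7 : PySem.Str.isIn "FZ" l = true
              · simp_all [PySem.Str.isIn]
              ·
                by_cases h8 : PySem.Str.isIn "Moment" l = true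
                · simp_all [PySem.Str.isIn]
                ·
                  by_cases h9 : PySem.Str.isIn "MX" l = true
                  · simp_all [PySem.Str.isIn]
                  ·
                    by_cases h10 : PySem.Str.isIn "MY" l = true
                    · simp_all [PySem.Str.isIn]
                    ·
                      by_cases h11 : PySem.Str.isIn "MZ" l = true
                      · simp_all [PySem.Str.isIn]
                      · simp_all [PySem.Str.isIn]

theorem foldl_aStep_eq (labels : List String) : ∀ (f e o : List String),
    labels.foldl aStep (f, e, o) =
      (f ++ labels.filter (fun l => classify_label l == 0),
       e ++ labels.filter (fun l => classify_label l == 1),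
       o ++ labels.filter (fun l => classify_label l == 2)) := by
  induction labels with
  | nil => intro f e o; simp
  | cons x xs ih =>
      intro f e o
      simp only [List.foldl_cons, aStep_eq_classify, List.filter_cons]
      rcases h : classify_label x with _ | _ | _ | n
      · simp [aStep_eq_classify, h, ih]
      · simp [aStep_eq_classify, h, ih]
      · simp [aStep_eq_classify, h, ih]
      · exfalso; unfold classify_label at h; split_ifs at h <;> omega

-- ===== VERDICT (by name: the statement is the Claim_ definition above) =====
theorem analog_channel_groups_spec : Claim_equal_analog_channel_groups := by
  intro labels _
  show _ = _
  unfold analog_channel_groups analog_channel_groups_alt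
  simp [foldl_aStep_eq]
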